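-- pv_equiv track=rewrite | github.com/luke-ck/sentiment-analysis | src/TweetNormalizer.py | spaceout
-- ===== SOURCE A (Python) =====
-- def spaceout(inp: str) -> [str]:
--     if len(inp) <= 1:
--         return [inp]
--     if len(inp) == 2:
--         return [inp, inp[0] + " " + inp[1]]
--     sub = spaceout(inp[1:])
--     a1 = map(lambda p: inp[0] + p, sub)
--     a2 = map(lambda p: inp[0] + " " + p, sub)
--     return list(a1) + list(a2)
-- ===== SOURCE B (Python) =====
-- def spaceout(inp: str) -> [str]:
--     n = len(inp)
--     if n <= 1:
--         return [inp]
--     out = []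
--     for mask in range(1 << (n - 1)):
--         s = ""
--         b = mask
--         for ch in reversed(inp[1:]):
--             s = (" " if b & 1 else "") + ch + s
--             b >>= 1
--         out.append(inp[0] + s)
--     return out
-- ===== Notes on version B (the rewrite author's own statement) =====
-- stated objective: alternative
-- what changed: Replaces A's recursion on the suffix (doubling the result list at each level) with a single loop over bitmasks 0..2^(n-1)-1, building each spaced string directly from the mask's bits (gap before the last character = least-significant bit).
import Mathlib
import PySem

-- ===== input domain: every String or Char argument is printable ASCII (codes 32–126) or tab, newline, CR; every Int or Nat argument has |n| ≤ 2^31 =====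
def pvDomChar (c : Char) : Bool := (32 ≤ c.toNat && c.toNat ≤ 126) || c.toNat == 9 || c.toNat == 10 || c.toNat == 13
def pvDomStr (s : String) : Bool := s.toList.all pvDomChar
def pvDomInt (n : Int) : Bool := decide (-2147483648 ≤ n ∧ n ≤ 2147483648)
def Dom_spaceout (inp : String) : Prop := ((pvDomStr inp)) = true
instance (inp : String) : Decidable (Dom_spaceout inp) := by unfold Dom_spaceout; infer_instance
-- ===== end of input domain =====

-- B enumerates the 2^(n-1) space insertions by bitmask instead of A's recursion on the suffix (alternative algorithm, same cost).

-- ===== PORT A =====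
-- A's recursion, transliterated on the character list (len ≤ 1, len = 2, then
-- sub = spaceout(inp[1:]); prefix inp[0] resp. inp[0]+" " to each element of sub).
def spaceoutA : List Char → List (List Char)
  | [] => [[]]
  | [c] => [[c]]
  | [c, d] => [[c, d], [c, ' ', d]]
  | c :: d :: e :: rest =>
      let sub := spaceoutA (d :: e :: rest)
      sub.map (fun p => c :: p) ++ sub.map (fun p => c :: ' ' :: p)

def spaceout (inp : String) : List String :=
  (spaceoutA inp.toList).map String.ofList

-- ===== PORT B =====
-- inner loop of Source B: walk reversed(inp[1:]) with state (s, b), prepending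
-- (" " if b & 1 else "") + ch and shifting b right each step.
def spaceoutStep (st : List Char × Nat) (ch : Char) : List Char × Nat :=
  ((if st.2 &&& 1 = 1 then ' ' :: ch :: st.1 else ch :: st.1), st.2 >>> 1)

def spaceoutBuild (rest : List Char) (mask : Nat) : List Char :=
  (rest.reverse.foldl spaceoutStep ([], mask)).1

def spaceout_alt (inp : String) : List String :=
  match inp.toList with
  | [] => [inp]
  | [_] => [inp]
  | c :: rest =>
      (List.range (2 ^ rest.length)).map
        (fun mask => String.ofList (c :: spaceoutBuild rest mask))

-- ===== PRECONDITION & SPEC =====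
def Spec_spaceout (inp : String) (out : List String) : Prop := out = spaceout_alt inp
instance (inp : String) (out : List String) : Decidable (Spec_spaceout inp out) := by unfold Spec_spaceout; infer_instance

-- ===== CLAIM (what is proved, stated in full; the proofs are below) =====
def Claim_equal_spaceout : Prop := ∀ (inp : String), Dom_spaceout inp → Spec_spaceout inp (spaceout inp)

-- ===== LEMMAS AND PROOFS =====

-- the mask component after folding over ys is mask >>> ys.length
theorem spaceout_snd_foldl (ys : List Char) : ∀ (s0 : List Char) (m : Nat),
    (ys.foldl spaceoutStep (s0, m)).2 = m >>> ys.length := by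
  induction ys with
  | nil => intro s0 m; simp
  | cons y ys ih =>
      intro s0 m
      simp only [List.foldl_cons, List.length_cons]
      rw [ih]
      show (m >>> 1) >>> ys.length = _
      rw [← Nat.shiftRight_add, Nat.add_comm]

-- the string component only depends on the low ys.length bits of the mask
theorem spaceout_fst_foldl (ys : List Char) : ∀ (s0 : List Char) (m t : Nat),
    (ys.foldl spaceoutStep (s0, m + 2 ^ ys.length * t)).1
      = (ys.foldl spaceoutStep (s0, m)).1 := by
  induction ys with
  | nil => intro s0 m t; simp
  | cons y ys ih =>
      intro s0 m t
      have hand : (m + 2 ^ (ys.length + 1) * t) &&& 1 = m &&& 1 := by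
        have h2 : 2 ^ (ys.length + 1) * t = (2 ^ ys.length * t) * 2 := by ring
        simp [Nat.and_one_is_mod, h2, Nat.add_mul_mod_self_right]
      have hshift : (m + 2 ^ (ys.length + 1) * t) >>> 1 = m >>> 1 + 2 ^ ys.length * t := by
        have h2 : 2 ^ (ys.length + 1) * t = 2 * (2 ^ ys.length * t) := by ring
        simp [Nat.shiftRight_succ, Nat.shiftRight_zero, h2,
          Nat.add_mul_div_left _ _ two_pos]
      simp only [List.length_cons, List.foldl_cons, spaceoutStep, hand, hshift]
      rw [ih]

-- peel the front character off spaceoutBuild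
theorem spaceoutBuild_cons (d : Char) (rs : List Char) (m : Nat) :
    spaceoutBuild (d :: rs) m =
      if (m >>> rs.length) &&& 1 = 1 then ' ' :: d :: spaceoutBuild rs m
      else d :: spaceoutBuild rs m := by
  unfold spaceoutBuild
  rw [List.reverse_cons, List.foldl_append]
  have hsnd := spaceout_snd_foldl rs.reverse ([] : List Char) m
  rw [List.length_reverse] at hsnd
  simp only [List.foldl_cons, List.foldl_nil, spaceoutStep, hsnd]

theorem spaceout_low_shift (m k : Nat) (h : m < 2 ^ k) : m >>> k = 0 := by
  simp [Nat.shiftRight_eq_div_pow, Nat.div_eq_of_lt h]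

theorem spaceout_high_shift (m k : Nat) (h : m < 2 ^ k) : (2 ^ k + m) >>> k = 1 := by
  rw [Nat.shiftRight_eq_div_pow, Nat.add_comm,
    Nat.add_div_right _ (Nat.two_pow_pos k), Nat.div_eq_of_lt h]

-- main invariant: A's recursion enumerates exactly B's masks in order
theorem spaceout_main : ∀ (rest : List Char) (c : Char),
    spaceoutA (c :: rest) =
      (List.range (2 ^ rest.length)).map (fun mask => c :: spaceoutBuild rest mask) := by
  intro rest
  induction rest with
  | nil => intro c; simp [spaceoutA, spaceoutBuild]
  | cons d rs ih =>
      intro c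
      cases rs with
      | nil => simp [spaceoutA, spaceoutBuild, spaceoutStep, List.range_succ]
      | cons e rs' =>
        have hA : spaceoutA (c :: d :: e :: rs') =
            (spaceoutA (d :: e :: rs')).map (fun p => c :: p)
              ++ (spaceoutA (d :: e :: rs')).map (fun p => c :: ' ' :: p) := rfl
        rw [hA, ih d]
        have hsplit : List.range (2 ^ ((d :: e :: rs').length))
            = List.range (2 ^ (e :: rs').length)
              ++ (List.range (2 ^ (e :: rs').length)).map (fun i => 2 ^ (e :: rs').length + i) := by
          have h2 : (2:Nat) ^ ((d :: e :: rs').length)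
              = 2 ^ (e :: rs').length + 2 ^ (e :: rs').length := by
            simp [List.length_cons, Nat.pow_succ]; ring
          rw [h2, List.range_add]
        rw [hsplit, List.map_append, List.map_map, List.map_map]
        congr 1
        · apply List.map_congr_left
          intro m hm
          have hmlt : m < 2 ^ (e :: rs').length := List.mem_range.mp hm
          simp only [Function.comp_apply]
          conv_rhs => rw [spaceoutBuild_cons]
          rw [spaceout_low_shift m _ hmlt]
          simp
        · rw [List.map_map]
          apply List.map_congr_left
          intro m hm
          have hmlt : m < 2 ^ (e :: rs').length := List.mem_range.mp hm
          simp only [Function.comp_apply]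
          conv_rhs => rw [spaceoutBuild_cons]
          rw [spaceout_high_shift m _ hmlt]
          have hlow : spaceoutBuild (e :: rs') (2 ^ (e :: rs').length + m)
              = spaceoutBuild (e :: rs') m := by
            have hf := spaceout_fst_foldl (e :: rs').reverse [] m 1
            rw [List.length_reverse] at hf
            unfold spaceoutBuild
            simpa [Nat.add_comm] using hf
          simp only [List.length_cons] at hlow
          simp [hlow]

-- ===== VERDICT (by name: the statement is the Claim_ definition above) =====
theorem spaceout_spec : Claim_equal_spaceout := by
  intro inp _
  unfold Spec_spaceout spaceout spaceout_alt
  cases h : inp.toList with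
  | nil =>
      show [String.ofList []] = [inp]
      rw [← String.ofList_toList (s := inp), h]
  | cons c rest =>
      cases rest with
      | nil =>
          show [String.ofList [c]] = [inp]
          rw [← String.ofList_toList (s := inp), h]
      | cons d rs =>
          show List.map String.ofList (spaceoutA (c :: d :: rs)) = _
          rw [spaceout_main, List.map_map]
          rfl
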